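-- pv_equiv track=rewrite | github.com/mjavorka/adventofcode | day4/day4.py | read_words
-- ===== SOURCE A (Python) =====
-- def read_words(words):
--     used_words = list()
--     for word in words:
--         word = word.rstrip()
--         if word not in used_words:
--             used_words.append(word)
--         else:
--             return False
--     return True
-- ===== SOURCE B (Python) =====
-- def read_words(words):
--     stripped = [w.rstrip() for w in words]
--     return len(set(stripped)) == len(stripped)
-- ===== Notes on version B (the rewrite author's own statement) =====
-- stated objective: idiomatic
-- what changed: Replaced the incremental membership-test loop with early return by building the stripped list once and deciding uniqueness with a single len(set(...)) == len(...) cardinality comparison.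
import Mathlib
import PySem

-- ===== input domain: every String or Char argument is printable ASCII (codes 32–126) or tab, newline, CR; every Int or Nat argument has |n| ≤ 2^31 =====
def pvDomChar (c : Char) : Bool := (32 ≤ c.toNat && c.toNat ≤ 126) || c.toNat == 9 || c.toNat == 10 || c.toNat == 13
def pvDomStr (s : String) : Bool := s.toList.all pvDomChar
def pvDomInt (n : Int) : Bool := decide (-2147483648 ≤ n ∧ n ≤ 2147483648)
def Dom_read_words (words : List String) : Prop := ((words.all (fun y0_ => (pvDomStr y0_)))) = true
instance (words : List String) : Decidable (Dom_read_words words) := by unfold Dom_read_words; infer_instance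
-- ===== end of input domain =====

-- B replaces A's incremental membership-test loop (early return) by building the
-- stripped list once and comparing len(set(stripped)) with len(stripped).

-- ===== PORT A =====
-- A's loop: carry used_words, strip each word, early-return False on a repeat.
def read_words_go (used : List String) (ws : List String) : Bool :=
  match ws with
  | [] => true
  | w :: rest =>
    let word := PySem.Str.rstrip w
    if word ∈ used then false
    else read_words_go (used ++ [word]) rest

def read_words (words : List String) : Bool :=
  read_words_go [] words

-- ===== PORT B =====
def read_words_alt (words : List String) : Bool :=
  let stripped := words.map PySem.Str.rstrip
  PySem.Set.len (PySem.Set.ofList stripped) == (stripped.length : Int)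

-- ===== PRECONDITION & SPEC =====
def Spec_read_words (words : List String) (out : Bool) : Prop := out = read_words_alt words
instance (words : List String) (out : Bool) : Decidable (Spec_read_words words out) := by unfold Spec_read_words; infer_instance

-- ===== CLAIM (what is proved, stated in full; the proofs are below) =====
def Claim_equal_read_words : Prop := ∀ (words : List String), Dom_read_words words → Spec_read_words words (read_words words)

-- ===== LEMMAS AND PROOFS =====

-- A's loop decides Nodup of used ++ stripped words, given used is Nodup.
theorem read_words_go_eq (ws : List String) : ∀ (used : List String), used.Nodup →
    read_words_go used ws = decide ((used ++ ws.map PySem.Str.rstrip).Nodup) := by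
  induction ws with
  | nil => intro used h; simp [read_words_go, h]
  | cons w rest ih =>
    intro used h
    simp only [read_words_go, List.map_cons]
    by_cases hmem : PySem.Str.rstrip w ∈ used
    · simp only [hmem, if_pos]
      have : ¬ ((used ++ PySem.Str.rstrip w :: rest.map PySem.Str.rstrip).Nodup) := by
        intro hnd
        rw [List.nodup_append] at hnd
        exact hnd.2.2 _ hmem (PySem.Str.rstrip w) (by simp) rfl
      simp [this]
    · simp only [hmem, if_neg, not_false_iff]
      have h' : (used ++ [PySem.Str.rstrip w]).Nodup := by
        rw [List.nodup_append]
        exact ⟨h, List.nodup_singleton _, by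
          intro a ha b hb hab
          simp only [List.mem_singleton] at hb
          exact hmem (hb ▸ hab ▸ ha)⟩
      rw [ih _ h', List.append_assoc]
      simp

-- len(set(xs)) = len(xs) iff xs has no duplicates.
theorem length_ofList_eq_iff_nodup {α : Type} [BEq α] [LawfulBEq α] (xs : List α) :
    ((PySem.Set.ofList xs).length = xs.length) ↔ xs.Nodup := by
  induction xs with
  | nil => simp [PySem.Set.ofList_nil]
  | cons x xs ih =>
    rw [PySem.Set.ofList_cons]
    by_cases hmem : x ∈ xs
    · have hx : x ∈ PySem.Set.ofList xs := by rw [PySem.Set.mem_ofList]; exact hmem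
      have hnd : (PySem.Set.ofList xs).Nodup := PySem.Set.nodup_ofList xs
      have hfl : ((PySem.Set.ofList xs).discard x).length = (PySem.Set.ofList xs).length - 1 := by
        have : (PySem.Set.ofList xs).discard x = (PySem.Set.ofList xs).erase x := by
          rw [hnd.erase_eq_filter]
          simp only [PySem.Set.discard]
          exact List.filter_congr (by intro a _; simp [bne])
        rw [this, List.length_erase_of_mem hx]
      have hle : (PySem.Set.ofList xs).length ≤ xs.length := PySem.Set.length_ofList_le xs
      have hpos : 0 < (PySem.Set.ofList xs).length := List.length_pos_of_mem hx
      constructor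
      · intro hlen
        exfalso
        simp only [List.length_cons, hfl] at hlen
        omega
      · intro hnd'
        exact absurd hmem (by simpa using (List.nodup_cons.mp hnd').1)
    · have hx : x ∉ PySem.Set.ofList xs := fun hc => hmem (by rwa [PySem.Set.mem_ofList] at hc)
      have hfl : (PySem.Set.ofList xs).discard x = PySem.Set.ofList xs := by
        simp only [PySem.Set.discard]
        exact List.filter_eq_self.mpr (fun a ha => by
          simp only [Bool.not_eq_eq_eq_not, Bool.not_true, beq_eq_false_iff_ne, ne_eq]
          exact fun hax => hx (hax ▸ ha))
      rw [hfl]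
      simp only [List.length_cons, List.nodup_cons]
      constructor
      · intro hlen; exact ⟨hmem, ih.mp (by omega)⟩
      · intro ⟨_, hnd⟩; rw [ih.mpr hnd]

-- ===== VERDICT (by name: the statement is the Claim_ definition above) =====
theorem read_words_spec : Claim_equal_read_words := by
  intro words _
  unfold Spec_read_words read_words read_words_alt
  rw [read_words_go_eq _ [] List.nodup_nil]
  simp only [List.nil_append, PySem.Set.len_eq]
  rcases Decidable.em ((words.map PySem.Str.rstrip).Nodup) with h | h
  · rw [(length_ofList_eq_iff_nodup _).mpr h]
    simp [h]
  · have hne : (PySem.Set.ofList (words.map PySem.Str.rstrip)).length ≠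
        (words.map PySem.Str.rstrip).length :=
      fun hc => h ((length_ofList_eq_iff_nodup _).mp hc)
    simp only [h, decide_false]
    symm
    rw [beq_eq_false_iff_ne]
    exact fun hc => hne (by exact_mod_cast hc)
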